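-- pv_equiv track=rewrite | github.com/culturiqai/atom-oss-sdk | scripts/plot_platform_ablations.py | _variant_order
-- ===== SOURCE A (Python) =====
-- from typing import Any, Dict, List, Optional, Sequence, Tuple
--
-- def _variant_order(rows: Sequence[Dict[str, Any]]) -> List[str]:
--     preferred = [
--         "v2_hybrid",
--         "v2_residual",
--         "v2_raw",
--         "v1_raw",
--         "no_scientist",
--         "full",
--         "no_symplectic",
--         "no_trust_gate",
--     ]
--     existing = [str(r.get("variant", "")) for r in rows]
--     out: List[str] = [v for v in preferred if v in existing]
--     for v in sorted(set(existing)):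
--         if v and v not in out:
--             out.append(v)
--     return out
-- ===== SOURCE B (Python) =====
-- from typing import Any, Dict, List, Sequence
--
--
-- def _variant_order(rows: Sequence[Dict[str, Any]]) -> List[str]:
--     preferred = [
--         "v2_hybrid",
--         "v2_residual",
--         "v2_raw",
--         "v1_raw",
--         "no_scientist",
--         "full",
--         "no_symplectic",
--         "no_trust_gate",
--     ]
--     names = {str(r.get("variant", "")) for r in rows}
--     names.discard("")
--     return sorted(
--         names,
--         key=lambda v: (preferred.index(v) if v in preferred else len(preferred), v),
--     )
-- ===== Notes on version B (the rewrite author's own statement) =====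
-- stated objective: idiomatic
-- what changed: A builds the result in two phases (filter the preferred list by presence, then loop over the sorted set appending unseen non-empty names); B computes the distinct non-empty names once and emits them with a single sorted() call keyed by (preferred-index-or-len, name).
import Mathlib
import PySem

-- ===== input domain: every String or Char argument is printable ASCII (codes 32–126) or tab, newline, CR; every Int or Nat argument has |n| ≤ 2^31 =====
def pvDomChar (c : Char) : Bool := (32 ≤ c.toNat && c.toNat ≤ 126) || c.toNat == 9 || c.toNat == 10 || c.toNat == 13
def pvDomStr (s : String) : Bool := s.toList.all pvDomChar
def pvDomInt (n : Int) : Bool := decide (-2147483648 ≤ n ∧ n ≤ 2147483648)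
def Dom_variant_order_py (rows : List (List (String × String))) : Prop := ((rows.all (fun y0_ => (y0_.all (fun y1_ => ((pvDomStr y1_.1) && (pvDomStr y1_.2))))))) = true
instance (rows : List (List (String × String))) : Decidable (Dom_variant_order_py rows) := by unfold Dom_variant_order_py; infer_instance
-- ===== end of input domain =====

-- B replaces A's two-phase "filter preferred, then append the sorted leftovers" by one keyed
-- sort of the distinct non-empty names (idiomatic single sorted() call; same asymptotic cost).

-- the fixed preference list shared (verbatim) by both Python versions
def pvPreferred : List String :=
  ["v2_hybrid", "v2_residual", "v2_raw", "v1_raw",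
   "no_scientist", "full", "no_symplectic", "no_trust_gate"]

-- ===== PORT A =====
def variant_order_py (rows : List (List (String × String))) : List String :=
  let existing := rows.map (fun r => PySem.Dict.getD (PySem.Dict.mk r) "variant" "")
  let out := pvPreferred.filter (fun v => existing.contains v)
  (PySem.List.sorted (PySem.Set.ofList existing) (fun x => x)).foldl
    (fun acc v => if v != "" && !(acc.contains v) then acc ++ [v] else acc) out

-- ===== PORT B =====
-- 'preferred.index(v) if v in preferred else len(preferred)' (the guard makes index total)
def pvRank (v : String) : Nat :=
  (PySem.List.index? pvPreferred v).getD pvPreferred.length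

def variant_order_py_alt (rows : List (List (String × String))) : List String :=
  let names :=
    PySem.Set.discard
      (PySem.Set.ofList (rows.map (fun r => PySem.Dict.getD (PySem.Dict.mk r) "variant" ""))) ""
  PySem.List.sorted2 names pvRank (fun v => v)

-- ===== PRECONDITION & SPEC =====
def Spec_variant_order_py (rows : List (List (String × String))) (out : List String) : Prop := out = variant_order_py_alt rows
instance (rows : List (List (String × String))) (out : List String) : Decidable (Spec_variant_order_py rows out) := by unfold Spec_variant_order_py; infer_instance

-- ===== CLAIM (what is proved, stated in full; the proofs are below) =====
def Claim_equal_variant_order_py : Prop := ∀ (rows : List (List (String × String))), Dom_variant_order_py rows → Spec_variant_order_py rows (variant_order_py rows)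

-- ===== LEMMAS AND PROOFS =====

-- sorted with a tuple key is sorted with the corresponding lexicographic key
lemma sorted2_eq_sorted_lex {α κ₁ κ₂ : Type} [LinearOrder κ₁] [LinearOrder κ₂]
    (xs : List α) (k1 : α → κ₁) (k2 : α → κ₂) :
    PySem.List.sorted2 xs k1 k2 = PySem.List.sorted xs (fun v => toLex (k1 v, k2 v)) := by
  have hbefore : (fun a b => decide (k1 a < k1 b) || (!decide (k1 b < k1 a) && decide (k2 a < k2 b)))
      = (fun a b => decide (toLex (k1 a, k2 a) < toLex (k1 b, k2 b))) := by
    funext a b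
    rcases lt_trichotomy (k1 a) (k1 b) with h | h | h
    · simp [Prod.Lex.lt_iff, h, asymm h]
    · simp [Prod.Lex.lt_iff, h]
    · simp [Prod.Lex.lt_iff, h, asymm h]
      exact fun heq => absurd heq (ne_of_gt h)
  rw [PySem.List.sorted_eq_foldl_insertBy]
  show List.foldl (fun acc x => PySem.List.insertBy
      (fun a b => decide (k1 a < k1 b) || (!decide (k1 b < k1 a) && decide (k2 a < k2 b))) x acc) [] xs = _
  rw [hbefore]

-- A's appending loop over a duplicate-free list is an append of a filter
lemma loopA (l : List String) (acc : List String) (hnd : l.Nodup) :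
    l.foldl (fun acc v => if v != "" && !(acc.contains v) then acc ++ [v] else acc) acc
      = acc ++ l.filter (fun v => v != "" && !(acc.contains v)) := by
  induction l generalizing acc with
  | nil => simp
  | cons x t ih =>
    rcases List.nodup_cons.mp hnd with ⟨hx, ht⟩
    simp only [List.foldl_cons, List.filter_cons]
    by_cases hc : (x != "" && !(acc.contains x)) = true
    · rw [if_pos hc, if_pos hc, ih _ ht, List.append_assoc, List.singleton_append]
      congr 1
      congr 1
      apply List.filter_congr
      intro v hv
      have hvx : v ≠ x := fun h => hx (h ▸ hv)
      simp [hvx]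
    · rw [if_neg hc, if_neg hc, ih _ ht]

lemma pref_pairwise : pvPreferred.Pairwise (fun a b => pvRank a < pvRank b) := by decide

lemma rank_not_mem {v : String} (h : v ∉ pvPreferred) : pvRank v = 8 := by
  have hnone : PySem.List.index? pvPreferred v = none := by
    simp [PySem.List.index?_eq_idxOf?, List.idxOf?_eq_none_iff, h]
  unfold pvRank
  rw [hnone]
  rfl

lemma rank_mem {v : String} (h : v ∈ pvPreferred) : pvRank v < 8 := by
  cases hi : PySem.List.index? pvPreferred v with
  | none =>
    exfalso
    have := (PySem.List.index?_eq_idxOf? pvPreferred v) ▸ hi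
    exact (List.idxOf?_eq_none_iff.mp this) h
  | some k =>
    obtain ⟨hk, -, -⟩ := PySem.List.getElem_of_index?_eq_some hi
    unfold pvRank
    rw [hi]
    simpa using hk

theorem variant_order_py_spec : Claim_equal_variant_order_py := by
  intro rows _
  unfold Spec_variant_order_py variant_order_py variant_order_py_alt
  simp only []
  set E : List String := rows.map (fun r => PySem.Dict.getD (PySem.Dict.mk r) "variant" "") with hE
  set S : List String := PySem.Set.ofList E with hS
  have hSnd : S.Nodup := PySem.Set.nodup_ofList E
  have hmemS : ∀ v, v ∈ S ↔ v ∈ E := fun v => PySem.Set.mem_ofList E v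
  set L0 : List String := pvPreferred.filter (fun v => E.contains v) with hL0
  set sortedS : List String := PySem.List.sorted S (fun x => x) with hsS
  have hsSperm : sortedS.Perm S := PySem.List.sorted_perm S (fun x => x) false
  have hsSnd : sortedS.Nodup := hsSperm.nodup_iff.mpr hSnd
  have hmemsS : ∀ v, v ∈ sortedS ↔ v ∈ E := fun v => by
    rw [hsSperm.mem_iff]; exact hmemS v
  -- A's value as an append of two filters
  have hA : sortedS.foldl
      (fun acc v => if v != "" && !(acc.contains v) then acc ++ [v] else acc) L0
      = L0 ++ sortedS.filter (fun v => v != "" && !(pvPreferred.contains v)) := by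
    rw [loopA _ _ hsSnd]
    congr 1
    apply List.filter_congr
    intro v hv
    have hvE : v ∈ E := (hmemsS v).mp hv
    by_cases hp : v ∈ pvPreferred
    · have : v ∈ L0 := by
        rw [hL0, List.mem_filter]
        exact ⟨hp, by simpa using hvE⟩
      simp [this, hp]
    · have : v ∉ L0 := by
        rw [hL0, List.mem_filter]
        exact fun h => hp h.1
      simp [this, hp]
  rw [hA]
  -- B's value: a single lexicographically keyed sort
  rw [sorted2_eq_sorted_lex]
  set rest : List String := sortedS.filter (fun v => v != "" && !(pvPreferred.contains v)) with hrest
  have hrest_mem : ∀ v ∈ rest, v ∈ E ∧ v ≠ "" ∧ v ∉ pvPreferred := by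
    intro v hv
    rw [hrest, List.mem_filter] at hv
    refine ⟨(hmemsS v).mp hv.1, ?_, ?_⟩
    · simpa using (Bool.and_elim_left hv.2)
    · simpa using (Bool.and_elim_right hv.2)
  have hL0_mem : ∀ v, v ∈ L0 ↔ v ∈ pvPreferred ∧ v ∈ E := by
    intro v
    rw [hL0, List.mem_filter]
    simp
  have hprefnd : pvPreferred.Nodup := by decide
  have hempty : ("" : String) ∉ pvPreferred := by decide
  symm
  apply PySem.List.sorted_eq_of_perm_of_pairwise_lt
  · -- permutation: (L0 ++ rest) ~ names
    have hnamesnd : (PySem.Set.discard S "").Nodup := by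
      rw [PySem.Set.discard]
      exact hSnd.filter _
    have hndL0 : L0.Nodup := hprefnd.filter _
    have hndrest : rest.Nodup := hsSnd.filter _
    have hdisj : L0.Disjoint rest := by
      intro v hv1 hv2
      exact (hrest_mem v hv2).2.2 ((hL0_mem v).mp hv1).1
    rw [List.perm_ext_iff_of_nodup (hndL0.append hndrest hdisj) hnamesnd]
    intro a
    rw [List.mem_append, hL0_mem a, PySem.Set.discard]
    constructor
    · rintro (⟨hp, he⟩ | hr)
      · rw [List.mem_filter]
        refine ⟨(hmemS a).mpr he, ?_⟩
        have hne : a ≠ "" := fun hh => hempty (hh ▸ hp)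
        simpa using hne
      · obtain ⟨he, hne, _⟩ := hrest_mem a hr
        rw [List.mem_filter]
        exact ⟨(hmemS a).mpr he, by simpa using hne⟩
    · intro h
      rw [List.mem_filter] at h
      obtain ⟨hsmem, hne⟩ := h
      have he : a ∈ E := (hmemS a).mp hsmem
      by_cases hp : a ∈ pvPreferred
      · exact Or.inl ⟨hp, he⟩
      · refine Or.inr ?_
        rw [hrest, List.mem_filter]
        refine ⟨(hmemsS a).mpr he, ?_⟩
        simpa using ⟨by simpa using hne, hp⟩
  · -- strictly increasing under the lexicographic key
    rw [List.pairwise_append]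
    refine ⟨?_, ?_, ?_⟩
    · have := pref_pairwise.sublist (List.filter_sublist (l := pvPreferred)
        (p := fun v => E.contains v))
      exact this.imp (fun h => Prod.Lex.lt_iff.mpr (Or.inl h))
    · have hpw : rest.Pairwise (fun a b => a < b) :=
        (PySem.List.sorted_ofList_pairwise_lt E).sublist List.filter_sublist
      refine hpw.imp_of_mem ?_
      intro a b ha hb hab
      have h8a := rank_not_mem (hrest_mem a ha).2.2
      have h8b := rank_not_mem (hrest_mem b hb).2.2
      refine Prod.Lex.lt_iff.mpr (Or.inr ⟨?_, ?_⟩) <;> simp [h8a, h8b, hab]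
    · intro a ha b hb
      have h1 : pvRank a < 8 := rank_mem ((hL0_mem a).mp ha).1
      have h2 := rank_not_mem (hrest_mem b hb).2.2
      refine Prod.Lex.lt_iff.mpr (Or.inl ?_)
      simp only [ofLex_toLex]
      omega
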